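-- pv_equiv track=rewrite | github.com/Siddhi22112334/news-pipelines | tech_brief.py | quality_weight
-- ===== SOURCE A (Python) =====
-- def quality_weight(link: str) -> int:
--     l = link.lower()
--     if any(x in l for x in ['blog.google','openai.com','blogs.nvidia.com','blogs.microsoft.com','aws.amazon.com']): return 12
--     if 'reuters.com' in l: return 7
--     if 'techcrunch.com' in l: return 6
--     if 'theverge.com' in l: return 5
--     if 'arstechnica.com' in l: return 5
--     if 'wired.com' in l: return 4
--     if 'engadget.com' in l: return 3
--     return 1
-- ===== SOURCE B (Python) =====
-- # Order-independent rewrite: since A's branch priority coincides with non-increasing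
-- # scores, the first match equals the MAXIMUM score over all matching domains.
-- # B therefore checks every domain and aggregates with max (default 1) - no
-- # priority order, no early exit.
-- _SCORES = {
--     'blog.google': 12, 'openai.com': 12, 'blogs.nvidia.com': 12,
--     'blogs.microsoft.com': 12, 'aws.amazon.com': 12,
--     'reuters.com': 7, 'techcrunch.com': 6, 'theverge.com': 5,
--     'arstechnica.com': 5, 'wired.com': 4, 'engadget.com': 3,
-- }
--
-- def quality_weight(link: str) -> int:
--     l = link.lower()
--     return max((w for d, w in _SCORES.items() if d in l), default=1)
-- ===== Notes on version B (the rewrite author's own statement) =====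
-- stated objective: alternative
-- what changed: Replaced the ordered first-match if/return chain by an order-independent aggregation: B scores the link as the maximum over all matching domains (default 1), which is correct because A's branch order lists scores in non-increasing order, so the first match is always the maximum match.
import Mathlib
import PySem

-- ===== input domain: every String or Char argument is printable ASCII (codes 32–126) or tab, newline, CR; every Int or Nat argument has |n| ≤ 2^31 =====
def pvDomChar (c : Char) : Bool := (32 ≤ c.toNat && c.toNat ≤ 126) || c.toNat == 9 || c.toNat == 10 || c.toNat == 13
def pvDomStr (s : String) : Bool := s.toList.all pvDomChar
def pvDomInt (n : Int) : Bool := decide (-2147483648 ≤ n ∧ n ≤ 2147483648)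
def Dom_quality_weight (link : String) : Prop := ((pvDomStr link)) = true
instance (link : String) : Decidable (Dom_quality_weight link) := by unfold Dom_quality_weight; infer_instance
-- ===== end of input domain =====

-- B replaces A's first-match if-chain by an order-independent max over all matching domains (default 1); equal since A's branch order is non-increasing in score.


-- ===== PORT A =====
def quality_weight (link : String) : Int :=
  let l := PySem.Str.lower link
  if (["blog.google", "openai.com", "blogs.nvidia.com", "blogs.microsoft.com",
       "aws.amazon.com"].any fun x => PySem.Str.isIn x l) then 12
  else if PySem.Str.isIn "reuters.com" l then 7
  else if PySem.Str.isIn "techcrunch.com" l then 6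
  else if PySem.Str.isIn "theverge.com" l then 5
  else if PySem.Str.isIn "arstechnica.com" l then 5
  else if PySem.Str.isIn "wired.com" l then 4
  else if PySem.Str.isIn "engadget.com" l then 3
  else 1

-- ===== PORT B =====
-- the _SCORES dict of Source B as an association list (insertion order)
def qwScores : List (String × Int) :=
  [("blog.google", 12), ("openai.com", 12), ("blogs.nvidia.com", 12),
   ("blogs.microsoft.com", 12), ("aws.amazon.com", 12),
   ("reuters.com", 7), ("techcrunch.com", 6), ("theverge.com", 5),
   ("arstechnica.com", 5), ("wired.com", 4), ("engadget.com", 3)]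

-- max over the matching entries with default 1, as a left fold over the dict items
def quality_weight_alt (link : String) : Int :=
  let l := PySem.Str.lower link
  qwScores.foldl (fun acc p => if PySem.Str.isIn p.1 l then max acc p.2 else acc) 1

-- ===== PRECONDITION & SPEC =====
def Spec_quality_weight (link : String) (out : Int) : Prop := out = quality_weight_alt link
instance (link : String) (out : Int) : Decidable (Spec_quality_weight link out) := by unfold Spec_quality_weight; infer_instance

-- ===== CLAIM (what is proved, stated in full; the proofs are below) =====
def Claim_equal_quality_weight : Prop := ∀ (link : String), Dom_quality_weight link → Spec_quality_weight link (quality_weight link)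

-- ===== LEMMAS AND PROOFS =====

-- A's first-match chain equals B's max-fold for any truth values of the eleven
-- membership tests (brute force over all 2^11 cases); holds because the scores
-- appear in non-increasing order.
set_option maxHeartbeats 4000000 in
lemma qw_chain_eq_maxfold : ∀ (b1 b2 b3 b4 b5 b6 b7 b8 b9 b10 b11 : Bool),
  (if (b1 || (b2 || (b3 || (b4 || (b5 || false))))) then (12:Int)
   else if b6 then 7 else if b7 then 6 else if b8 then 5 else if b9 then 5
   else if b10 then 4 else if b11 then 3 else 1)
  =
  ([(b1,(12:Int)), (b2,12), (b3,12), (b4,12), (b5,12), (b6,7), (b7,6),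
    (b8,5), (b9,5), (b10,4), (b11,3)]).foldl
      (fun acc p => if p.1 then max acc p.2 else acc) 1 := by
  decide

-- ===== VERDICT (by name: the statement is the Claim_ definition above) =====
set_option maxHeartbeats 4000000 in
theorem quality_weight_spec : Claim_equal_quality_weight := by
  intro link _
  exact qw_chain_eq_maxfold
    (PySem.Str.isIn "blog.google" (PySem.Str.lower link))
    (PySem.Str.isIn "openai.com" (PySem.Str.lower link))
    (PySem.Str.isIn "blogs.nvidia.com" (PySem.Str.lower link))
    (PySem.Str.isIn "blogs.microsoft.com" (PySem.Str.lower link))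
    (PySem.Str.isIn "aws.amazon.com" (PySem.Str.lower link))
    (PySem.Str.isIn "reuters.com" (PySem.Str.lower link))
    (PySem.Str.isIn "techcrunch.com" (PySem.Str.lower link))
    (PySem.Str.isIn "theverge.com" (PySem.Str.lower link))
    (PySem.Str.isIn "arstechnica.com" (PySem.Str.lower link))
    (PySem.Str.isIn "wired.com" (PySem.Str.lower link))
    (PySem.Str.isIn "engadget.com" (PySem.Str.lower link))
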